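-- pv_equiv track=rewrite | github.com/Licht-theone/algoritmica_uc | src/pract01/pract01.py | suma_dist
-- ===== SOURCE A (Python) =====
-- def suma_dist(arr):
--     n = len(arr)
--     suma_distancia = 0
--
--     for i in range(n):
--         encontrado = False
--         num = arr[i]
--         dist = 0
--
--         # busca el primer numero a la derecha que sea mayor
--         for j in range(i + 1, n):
--             dist += 1
--             if arr[j] > num:
--                 encontrado = True
--                 break
--
--         # si no se encuentra un numero mayor, se determina que existe otro mayor al final de la lista
--         if not encontrado:
--             dist += 1
--
--         #suma la distancia
--         suma_distancia += dist
--
--     return suma_distancia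
-- ===== SOURCE B (Python) =====
-- def suma_dist(arr):
--     # Monotonic stack: one pass, O(n); pending indices wait on the stack
--     # until a strictly greater value resolves their distance.
--     n = len(arr)
--     total = 0
--     stack = []  # (index, value) pairs; values non-increasing bottom to top
--     for j, x in enumerate(arr):
--         while stack and stack[-1][1] < x:
--             i, _ = stack.pop()
--             total += j - i
--         stack.append((j, x))
--     for i, _ in stack:
--         total += n - i
--     return total
-- ===== Notes on version B (the rewrite author's own statement) =====
-- stated objective: faster
-- what changed: A scans right from every position for the next greater element (nested loops); B makes a single left-to-right pass with a monotonic stack of pending (index, value) pairs, resolving each distance when a strictly greater value arrives and charging n - i to indices still pending at the end.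
import Mathlib
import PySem

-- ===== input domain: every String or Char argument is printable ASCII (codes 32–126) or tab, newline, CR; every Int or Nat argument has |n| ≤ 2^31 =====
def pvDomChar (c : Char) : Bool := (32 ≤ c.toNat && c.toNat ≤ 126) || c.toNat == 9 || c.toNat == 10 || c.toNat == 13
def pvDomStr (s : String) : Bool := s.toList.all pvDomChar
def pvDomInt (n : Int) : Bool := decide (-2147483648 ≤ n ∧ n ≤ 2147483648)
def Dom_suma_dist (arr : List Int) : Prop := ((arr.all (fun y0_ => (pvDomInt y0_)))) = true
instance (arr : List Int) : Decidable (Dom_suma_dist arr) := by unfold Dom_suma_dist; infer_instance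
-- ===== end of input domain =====

-- B replaces A's quadratic scan-right-for-the-next-greater-element with a single
-- left-to-right pass over a monotonic stack of pending (index, value) pairs.

-- ===== PORT A =====
-- inner loop 'for j in range(i+1, n): dist += 1; if arr[j] > num: break'
def innerA (arr : List Int) (num : Int) : List Int → Int → Bool × Int
  | [], dist => (false, dist)
  | j :: rest, dist =>
    let dist := dist + 1
    if PySem.List.pyGetD arr j 0 > num then (true, dist)
    else innerA arr num rest dist

-- body of the outer 'for i in range(n)' loop
def stepA (arr : List Int) (suma i : Int) : Int :=
  let num := PySem.List.pyGetD arr i 0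
  let p := innerA arr num (PySem.List.pyRange (i + 1) (arr.length : Int) 1) 0
  let dist := if p.1 = false then p.2 + 1 else p.2
  suma + dist

def suma_dist (arr : List Int) : Int :=
  (PySem.List.pyRange 0 (arr.length : Int) 1).foldl (stepA arr) 0

-- ===== PORT B =====
-- 'while stack and stack[-1][1] < x: i, _ = stack.pop(); total += j - i'
-- (stack head = Python's stack top)
def popLoop (x j : Int) : List (Int × Int) → Int → List (Int × Int) × Int
  | [], total => ([], total)
  | (i, v) :: rest, total =>
    if v < x then popLoop x j rest (total + (j - i))
    else ((i, v) :: rest, total)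

-- body of 'for j, x in enumerate(arr)'
def stepB (st : List (Int × Int) × Int) (jx : Int × Int) : List (Int × Int) × Int :=
  let p := popLoop jx.2 jx.1 st.1 st.2
  ((jx.1, jx.2) :: p.1, p.2)

def suma_dist_alt (arr : List Int) : Int :=
  let st := (PySem.List.enumerate arr).foldl stepB ([], 0)
  -- 'for i, _ in stack: total += n - i' iterates bottom-to-top, i.e. over the reverse
  st.1.reverse.foldl (fun total iv => total + ((arr.length : Int) - iv.1)) st.2

-- ===== PRECONDITION & SPEC =====
def Spec_suma_dist (arr : List Int) (out : Int) : Prop := out = suma_dist_alt arr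
instance (arr : List Int) (out : Int) : Decidable (Spec_suma_dist arr out) := by unfold Spec_suma_dist; infer_instance

-- ===== CLAIM (what is proved, stated in full; the proofs are below) =====
def Claim_equal_suma_dist : Prop := ∀ (arr : List Int), Dom_suma_dist arr → Spec_suma_dist arr (suma_dist arr)

-- ===== LEMMAS AND PROOFS =====

-- the common specification: each element contributes
-- (length of the following run of elements ≤ it) + 1
def W (v : Int) (l : List Int) : Int := ((l.takeWhile (fun y => decide (y ≤ v))).length : Int)

def spec : List Int → Int
  | [] => 0
  | x :: xs => (W x xs + 1) + spec xs

theorem W_nil (v : Int) : W v [] = 0 := rfl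

theorem W_cons (v x : Int) (l : List Int) :
    W v (x :: l) = if x ≤ v then W v l + 1 else 0 := by
  by_cases h : x ≤ v <;> simp [W, h]

-- ---------- A = spec ----------

-- inner loop over range(i+1, n) = structural scan of arr.drop (i+1)
def innerSpec (num : Int) : List Int → Int → Bool × Int
  | [], d => (false, d)
  | y :: ys, d => if y > num then (true, d + 1) else innerSpec num ys (d + 1)

theorem innerA_spec (arr : List Int) (num : Int) :
    ∀ (l : List Int) (i : Nat) (d : Int), arr.drop i = l →
      innerA arr num (PySem.List.pyRange (i : Int) (arr.length : Int) 1) d = innerSpec num l d := by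
  intro l
  induction l with
  | nil =>
    intro i d h
    have hlen : arr.length ≤ i := by
      have := congrArg List.length h; simp at this; omega
    rw [PySem.List.pyRange_one_eq_nil (by exact_mod_cast hlen)]
    rfl
  | cons y ys ih =>
    intro i d h
    have hi : i < arr.length := by
      by_contra hc
      rw [List.drop_eq_nil_of_le (by omega)] at h
      simp at h
    have hdec := List.drop_eq_getElem_cons (l := arr) hi
    rw [h] at hdec
    injection hdec with hy' hys'
    have hy : arr[i] = y := hy'.symm
    have hys : arr.drop (i + 1) = ys := hys'.symm
    rw [PySem.List.pyRange_one_cons (by exact_mod_cast hi)]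
    show (let dist := d + 1;
      if PySem.List.pyGetD arr (i : Int) 0 > num then (true, dist)
      else innerA arr num (PySem.List.pyRange ((i : Int) + 1) (arr.length : Int) 1) dist) = _
    have hget : PySem.List.pyGetD arr (i : Int) 0 = y := by
      rw [PySem.List.pyGetD_natCast, List.getD_eq_getElem?_getD, List.getElem?_eq_getElem hi, hy]
      rfl
    have hcast : (i : Int) + 1 = ((i + 1 : Nat) : Int) := by push_cast; ring
    rw [hget, hcast]
    by_cases hgt : y > num
    · simp [innerSpec, hgt]
    · simp only [hgt, if_false, innerSpec]
      exact ih (i + 1) (d + 1) hys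

theorem innerSpec_dist (num : Int) :
    ∀ (l : List Int) (d : Int),
      (if (innerSpec num l d).1 = false then (innerSpec num l d).2 + 1 else (innerSpec num l d).2)
        = d + W num l + 1 := by
  intro l
  induction l with
  | nil => intro d; simp [innerSpec, W_nil]
  | cons y ys ih =>
    intro d
    by_cases hgt : y > num
    · have hn : ¬ y ≤ num := by omega
      have hW : W num (y :: ys) = 0 := by rw [W_cons]; simp [hn]
      simp [innerSpec, hgt, hW]
    · have hle : y ≤ num := by omega
      have hW : W num (y :: ys) = W num ys + 1 := by rw [W_cons]; simp [hle]
      simp only [innerSpec, hgt, if_false]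
      rw [ih (d + 1), hW]; ring

theorem outer_spec (arr : List Int) :
    ∀ (l : List Int) (i : Nat) (acc : Int), arr.drop i = l →
      (PySem.List.pyRange (i : Int) (arr.length : Int) 1).foldl (stepA arr) acc = acc + spec l := by
  intro l
  induction l with
  | nil =>
    intro i acc h
    have hlen : arr.length ≤ i := by
      have := congrArg List.length h; simp at this; omega
    rw [PySem.List.pyRange_one_eq_nil (by exact_mod_cast hlen)]
    simp [spec]
  | cons y ys ih =>
    intro i acc h
    have hi : i < arr.length := by
      by_contra hc
      rw [List.drop_eq_nil_of_le (by omega)] at h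
      simp at h
    have hdec := List.drop_eq_getElem_cons (l := arr) hi
    rw [h] at hdec
    injection hdec with hy' hys'
    have hy : arr[i] = y := hy'.symm
    have hys : arr.drop (i + 1) = ys := hys'.symm
    rw [PySem.List.pyRange_one_cons (by exact_mod_cast hi), List.foldl_cons]
    have hcast : (i : Int) + 1 = ((i + 1 : Nat) : Int) := by push_cast; ring
    have hstep : stepA arr acc (i : Int) = acc + (W y ys + 1) := by
      show (let num := PySem.List.pyGetD arr (i : Int) 0;
        let p := innerA arr num (PySem.List.pyRange ((i : Int) + 1) (arr.length : Int) 1) 0;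
        let dist := if p.1 = false then p.2 + 1 else p.2;
        acc + dist) = acc + (W y ys + 1)
      have hget : PySem.List.pyGetD arr (i : Int) 0 = y := by
        rw [PySem.List.pyGetD_natCast, List.getD_eq_getElem?_getD, List.getElem?_eq_getElem hi, hy]
        rfl
      simp only [hget, hcast]
      rw [innerA_spec arr y ys (i + 1) 0 hys, innerSpec_dist y ys 0]
      ring
    rw [hstep, hcast, ih (i + 1) (acc + (W y ys + 1)) hys]
    show acc + (W y ys + 1) + spec ys = acc + spec (y :: ys)
    simp [spec]; ring

theorem A_eq_spec (arr : List Int) : suma_dist arr = spec arr := by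
  have h := outer_spec arr arr 0 0 (by simp)
  simpa [suma_dist] using h

-- ---------- B = spec ----------

-- pending contribution of the stack at the end: Σ (n - i)
def SumN (n : Int) : List (Int × Int) → Int
  | [] => 0
  | (i, _) :: s => (n - i) + SumN n s

-- pending contribution at position j with remaining input l: Σ ((j - i) + W v l)
def SumP (j : Int) (l : List Int) : List (Int × Int) → Int
  | [] => 0
  | (i, v) :: s => ((j - i) + W v l) + SumP j l s

theorem SumN_append (n : Int) (s t : List (Int × Int)) :
    SumN n (s ++ t) = SumN n s + SumN n t := by
  induction s with
  | nil => simp [SumN]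
  | cons p s ih => obtain ⟨i, v⟩ := p; simp [SumN, ih]; ring

theorem SumN_reverse (n : Int) (s : List (Int × Int)) : SumN n s.reverse = SumN n s := by
  induction s with
  | nil => rfl
  | cons p s ih => obtain ⟨i, v⟩ := p; simp [List.reverse_cons, SumN_append, SumN, ih]; ring

theorem foldl_SumN (n : Int) :
    ∀ (s : List (Int × Int)) (total : Int),
      s.foldl (fun t iv => t + (n - iv.1)) total = total + SumN n s := by
  intro s
  induction s with
  | nil => intro total; simp [SumN]
  | cons p s ih => obtain ⟨i, v⟩ := p; intro total; simp [SumN, ih]; ring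

theorem SumP_nil_eq_SumN (j : Int) (s : List (Int × Int)) : SumP j [] s = SumN j s := by
  induction s with
  | nil => rfl
  | cons p s ih => obtain ⟨i, v⟩ := p; simp [SumP, SumN, W_nil, ih]

theorem SumP_shift (j x : Int) (l : List Int) :
    ∀ (s : List (Int × Int)), (∀ p ∈ s, x ≤ p.2) →
      SumP j (x :: l) s = SumP (j + 1) l s := by
  intro s
  induction s with
  | nil => intro _; rfl
  | cons p s ih =>
    obtain ⟨i, v⟩ := p
    intro hall
    have hv : x ≤ v := hall (i, v) (by simp)
    rw [SumP, SumP, W_cons, if_pos hv, ih (fun q hq => hall q (by simp [hq]))]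
    ring

theorem pop_spec (x j : Int) (l : List Int) :
    ∀ (s : List (Int × Int)) (total : Int), s.Pairwise (fun a b => a.2 ≤ b.2) →
      (popLoop x j s total).2 + SumP j (x :: l) (popLoop x j s total).1
          = total + SumP j (x :: l) s
        ∧ (popLoop x j s total).1.Pairwise (fun a b => a.2 ≤ b.2)
        ∧ ∀ p ∈ (popLoop x j s total).1, x ≤ p.2 := by
  intro s
  induction s with
  | nil => intro total _; exact ⟨rfl, List.Pairwise.nil, by simp [popLoop]⟩
  | cons p s ih =>
    obtain ⟨i, v⟩ := p
    intro total hpw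
    by_cases hv : v < x
    · have hn : ¬ x ≤ v := by omega
      have hW : W v (x :: l) = 0 := by rw [W_cons]; simp [hn]
      have := ih (total + (j - i)) (List.Pairwise.sublist (List.sublist_cons_self _ _) hpw)
      simp only [popLoop, if_pos hv]
      refine ⟨?_, this.2.1, this.2.2⟩
      rw [this.1, SumP, hW]; ring
    · simp only [popLoop, if_neg hv]
      refine ⟨trivial, hpw, ?_⟩
      intro q hq
      rcases List.mem_cons.mp hq with h | h
      · rw [h]; omega
      · have := (List.pairwise_cons.mp hpw).1 q h
        simp only at this; omega

-- the enumerate fold, written structurally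
def G : List Int → Int → List (Int × Int) → Int → List (Int × Int) × Int
  | [], _, s, total => (s, total)
  | x :: l, j, s, total =>
    let p := popLoop x j s total
    G l (j + 1) ((j, x) :: p.1) p.2

theorem fold_enum :
    ∀ (l : List Int) (j : Int) (s : List (Int × Int)) (total : Int),
      (PySem.List.enumerate l j).foldl stepB (s, total) = G l j s total := by
  intro l
  induction l with
  | nil => intro j s total; rfl
  | cons x l ih =>
    intro j s total
    rw [PySem.List.enumerate_cons, List.foldl_cons]
    show List.foldl stepB (stepB (s, total) (j, x)) _ = _
    rw [show stepB (s, total) (j, x)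
          = ((j, x) :: (popLoop x j s total).1, (popLoop x j s total).2) from rfl]
    rw [ih]
    rfl

theorem G_spec :
    ∀ (l : List Int) (j : Int) (s : List (Int × Int)) (total : Int),
      s.Pairwise (fun a b => a.2 ≤ b.2) →
      (G l j s total).2 + SumN (j + (l.length : Int)) (G l j s total).1
        = total + SumP j l s + spec l := by
  intro l
  induction l with
  | nil =>
    intro j s total _
    simp only [G, spec, SumP_nil_eq_SumN]
    simp
  | cons x l ih =>
    intro j s total hpw
    obtain ⟨hsum, hpw', hall⟩ := pop_spec x j l s total hpw
    have hpw'' : ((j, x) :: (popLoop x j s total).1).Pairwise (fun a b => a.2 ≤ b.2) :=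
      List.pairwise_cons.mpr ⟨fun q hq => hall q hq, hpw'⟩
    have hih := ih (j + 1) ((j, x) :: (popLoop x j s total).1) (popLoop x j s total).2 hpw''
    simp only [G]
    have hlen : j + ((x :: l).length : Int) = (j + 1) + (l.length : Int) := by
      push_cast [List.length_cons]; ring
    rw [hlen, hih]
    rw [show SumP (j + 1) l ((j, x) :: (popLoop x j s total).1)
          = (((j + 1) - j) + W x l) + SumP (j + 1) l (popLoop x j s total).1 from rfl]
    rw [← SumP_shift j x l (popLoop x j s total).1 hall]
    have hs : spec (x :: l) = (W x l + 1) + spec l := rfl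
    rw [hs]
    linarith [hsum]

theorem B_eq_spec (arr : List Int) : suma_dist_alt arr = spec arr := by
  show ((PySem.List.enumerate arr).foldl stepB ([], 0)).1.reverse.foldl
      (fun total iv => total + ((arr.length : Int) - iv.1))
      ((PySem.List.enumerate arr).foldl stepB ([], 0)).2 = spec arr
  rw [show PySem.List.enumerate arr = PySem.List.enumerate arr 0 from rfl]
  rw [fold_enum arr 0 [] 0]
  rw [foldl_SumN (arr.length : Int) _ _, SumN_reverse]
  have h := G_spec arr 0 [] 0 List.Pairwise.nil
  simp only [zero_add, SumP] at h
  simpa using h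

-- ===== VERDICT (by name: the statement is the Claim_ definition above) =====
theorem suma_dist_spec : Claim_equal_suma_dist := by
  intro arr _
  show suma_dist arr = suma_dist_alt arr
  rw [A_eq_spec, B_eq_spec]
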